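-- pv_equiv track=rewrite | github.com/napari/napari | gui/util.py | compute_max_shape
-- ===== SOURCE A (Python) =====
-- def compute_max_shape(shapes, max_dims=None):
--     """Computes the maximum shape combination from the given shapes.
--
--     Parameters
--     ----------
--     shapes : iterable of tuple
--         Shapes to coombine.
--     max_dims : int, optional
--         Pre-computed maximum dimensions of the final shape.
--         If None, is computed on the fly.
--
--     Returns
--     -------
--     max_shape : tuple
--         Maximum shape combination.
--     """
--     shapes = tuple(shapes)
--
--     if max_dims is None:
--         max_dims = max(len(shape) for shape in shapes)
--
--     max_shape = [0,] * max_dims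
--
--     for dim in range(max_dims):
--         for shape in shapes:
--             try:
--                 dim_len = shape[dim]
--             except IndexError:
--                 pass
--             else:
--                 if dim_len > max_shape[dim]:
--                     max_shape[dim] = dim_len
--
--     return tuple(max_shape)
-- ===== SOURCE B (Python) =====
-- def compute_max_shape(shapes, max_dims=None):
--     """Computes the maximum shape combination from the given shapes.
--
--     Pairwise-merge reduction: fold the shapes with an elementwise-max merge
--     (zip the overlap, keep the longer tail), then clamp to zero and
--     pad/truncate to max_dims in one final pass.
--     """
--     shapes = tuple(shapes)
--
--     merged = []
--     for shape in shapes: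
--         common = [max(x, y) for x, y in zip(merged, shape)]
--         k = len(common)
--         merged = common + list(merged[k:]) + list(shape[k:])
--
--     if max_dims is None:
--         max_dims = max(map(len, shapes))
--
--     return tuple(max(merged[i], 0) if i < len(merged) else 0
--                  for i in range(max_dims))
-- ===== Notes on version B (the rewrite author's own statement) =====
-- stated objective: faster
-- what changed: A preallocates a max_dims array and, for every dimension, probes every shape with try/except IndexError; B folds the shapes with a pairwise elementwise-max merge (zip the overlap, keep the longer tail), then clamps to zero and pads/truncates to max_dims in one final pass.
import Mathlib
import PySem

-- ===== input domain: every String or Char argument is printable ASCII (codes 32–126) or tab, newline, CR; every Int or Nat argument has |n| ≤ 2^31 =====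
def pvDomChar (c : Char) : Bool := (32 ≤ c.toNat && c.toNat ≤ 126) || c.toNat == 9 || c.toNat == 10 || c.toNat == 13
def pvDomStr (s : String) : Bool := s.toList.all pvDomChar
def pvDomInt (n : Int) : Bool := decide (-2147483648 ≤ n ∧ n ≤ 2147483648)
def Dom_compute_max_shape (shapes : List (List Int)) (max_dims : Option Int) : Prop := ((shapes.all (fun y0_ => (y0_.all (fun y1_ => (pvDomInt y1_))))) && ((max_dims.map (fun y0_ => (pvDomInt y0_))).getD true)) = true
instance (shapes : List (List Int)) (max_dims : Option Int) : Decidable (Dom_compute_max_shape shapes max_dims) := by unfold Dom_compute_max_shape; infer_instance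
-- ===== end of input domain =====

-- B replaces A's per-dimension probing of every shape (try/except IndexError into a
-- preallocated array) by a pairwise elementwise-max merge fold over the shapes plus one
-- final clamp/pad pass; equal return value is proved on Pre_ below.

-- ===== PORT A =====
def compute_max_shape (shapes : List (List Int)) (max_dims : Option Int) : List Int :=
  let md : Int :=
    match max_dims with
    | some d => d
    | none => (PySem.List.max? (shapes.map (fun shape => (shape.length : Int))) id).getD 0
      -- Python's max(...) raises ValueError on empty `shapes`: excluded by Pre_; the getD default is unreachable there
  let max_shape : List Int := List.replicate md.toNat 0   -- [0,] * max_dims ([] for negative md)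
  (PySem.List.pyRange 0 md 1).foldl
    (fun max_shape dim =>
      shapes.foldl
        (fun max_shape shape =>
          match PySem.List.pyGet? shape dim with
          | none => max_shape                               -- except IndexError: pass
          | some dim_len =>
            if dim_len > (PySem.List.pyGet? max_shape dim).getD 0 then
              -- max_shape[dim] = dim_len; 0 ≤ dim < md = len(max_shape), so the read/write are in range
              max_shape.set dim.toNat dim_len
            else max_shape)
        max_shape)
    max_shape

-- ===== PORT B =====
def compute_max_shape_alt (shapes : List (List Int)) (max_dims : Option Int) : List Int :=
  let merged : List Int := shapes.foldl
    (fun merged shape =>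
      let common := (merged.zip shape).map (fun p => max p.1 p.2)
      let k := common.length
      -- merged[k:] and shape[k:] with 0 ≤ k: exact as List.drop
      common ++ merged.drop k ++ shape.drop k)
    []
  let md : Int :=
    match max_dims with
    | some d => d
    | none => (PySem.List.max? (shapes.map (fun shape => (shape.length : Int))) id).getD 0
      -- Python's max(map(len, shapes)) raises ValueError on empty `shapes`: excluded by Pre_; the getD default is unreachable there
  (PySem.List.pyRange 0 md 1).map (fun i =>
    -- max(merged[i], 0) if i < len(merged) else 0; 0 ≤ i so the read is in range
    if i < (merged.length : Int) then max ((PySem.List.pyGet? merged i).getD 0) 0 else 0)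

-- ===== PRECONDITION & SPEC =====
-- Pre_ excludes only shapes = [] with max_dims = None, where Python A (and B) raise ValueError in max().
def Pre_compute_max_shape (shapes : List (List Int)) (max_dims : Option Int) : Prop :=
  shapes ≠ [] ∨ max_dims ≠ none
instance (shapes : List (List Int)) (max_dims : Option Int) : Decidable (Pre_compute_max_shape shapes max_dims) := by unfold Pre_compute_max_shape; infer_instance
def pvWitness_compute_max_shape : List (List Int) × Option Int := ([[1, 2], [3]], none)

def Spec_compute_max_shape (shapes : List (List Int)) (max_dims : Option Int) (out : List Int) : Prop := out = compute_max_shape_alt shapes max_dims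
instance (shapes : List (List Int)) (max_dims : Option Int) (out : List Int) : Decidable (Spec_compute_max_shape shapes max_dims out) := by unfold Spec_compute_max_shape; infer_instance

-- ===== CLAIM (what is proved, stated in full; the proofs are below) =====
def Claim_equal_compute_max_shape : Prop := ∀ (shapes : List (List Int)) (max_dims : Option Int), Dom_compute_max_shape shapes max_dims → Pre_compute_max_shape shapes max_dims → Spec_compute_max_shape shapes max_dims (compute_max_shape shapes max_dims)

-- ===== LEMMAS AND PROOFS =====

-- one maximisation step of a single shape at dimension j
def pvUpd (j : Nat) (m : Int) (s : List Int) : Int :=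
  match s[j]? with
  | some v => if v > m then v else m
  | none => m

-- the common value of both ports: entry j is the running max over all shapes at dimension j
def pvTarget (shapes : List (List Int)) (n : Nat) : List Int :=
  (List.range n).map (fun j => shapes.foldl (fun m s => pvUpd j m s) 0)

-- B's merge step and its pointwise description
def pvMerge (a b : List Int) : List Int :=
  let common := (a.zip b).map (fun p => max p.1 p.2)
  let k := common.length
  common ++ a.drop k ++ b.drop k

def pvOmax (o w : Option Int) : Option Int :=
  match o, w with
  | some x, some y => some (max x y)
  | some x, none => some x
  | none, w => w

def pvClamp (o : Option Int) : Int :=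
  match o with
  | some v => max v 0
  | none => 0

theorem set_map_range {N n : Nat} (hn : n < N) (g : Nat → Int) (x : Int) :
    ((List.range N).map g).set n x = (List.range N).map (fun j => if j = n then x else g j) := by
  apply List.ext_getElem
  · simp
  · intro k h1 h2
    simp only [List.getElem_set, List.getElem_map, List.getElem_range] at *
    rcases eq_or_ne k n with rfl | h
    · simp
    · simp [h, Ne.symm h]

-- A's inner loop over shapes at a fixed dimension j only rewrites entry j
theorem innerA_eq (shapes : List (List Int)) (j : Nat) :
    ∀ (ms : List Int), j < ms.length →
    shapes.foldl
      (fun max_shape shape =>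
        match PySem.List.pyGet? shape (j : Int) with
        | none => max_shape
        | some dim_len =>
          if dim_len > (PySem.List.pyGet? max_shape (j : Int)).getD 0 then
            max_shape.set (j : Int).toNat dim_len
          else max_shape)
      ms
    = ms.set j (shapes.foldl (fun m s => pvUpd j m s) (ms.getD j 0)) := by
  induction shapes with
  | nil =>
    intro ms hj
    simp [List.getD_eq_getElem?_getD, List.getElem?_eq_getElem hj,
      List.set_getElem_self]
  | cons s ss ih =>
    intro ms hj
    rw [List.foldl_cons, List.foldl_cons]
    simp only [PySem.List.pyGet?_natCast, Int.toNat_natCast] at ih ⊢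
    cases hsj : s[j]? with
    | none =>
      dsimp only
      rw [ih ms hj]
      simp [pvUpd, hsj]
    | some v =>
      dsimp only
      by_cases hv : v > ms[j]?.getD 0
      · simp only [hv, if_true]
        rw [ih (ms.set j v) (by simpa using hj)]
        simp [pvUpd, hsj, hv, List.set_set, List.getElem?_set_self hj]
      · simp only [hv, if_false]
        rw [ih ms hj]
        simp [pvUpd, hsj, hv]

-- A's outer loop over the first n dimensions fills entries 0..n-1 with the target values
theorem foldA_eq (shapes : List (List Int)) (N : Nat) :
    ∀ (n : Nat), n ≤ N →
    ((List.range n).map (fun k : Nat => (k : Int))).foldl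
      (fun max_shape dim =>
        shapes.foldl
          (fun max_shape shape =>
            match PySem.List.pyGet? shape dim with
            | none => max_shape
            | some dim_len =>
              if dim_len > (PySem.List.pyGet? max_shape dim).getD 0 then
                max_shape.set dim.toNat dim_len
              else max_shape)
          max_shape)
      (List.replicate N 0)
    = (List.range N).map (fun j =>
        if j < n then shapes.foldl (fun m s => pvUpd j m s) 0 else 0) := by
  intro n
  induction n with
  | zero =>
    intro _
    apply List.ext_getElem
    · simp
    · intro k h1 h2; simp
  | succ n ih =>
    intro hn
    have hn' : n ≤ N := Nat.le_of_succ_le hn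
    have hnN : n < N := hn
    rw [List.range_succ, List.map_append, List.foldl_append, ih hn']
    simp only [List.map_cons, List.map_nil, List.foldl_cons, List.foldl_nil]
    rw [innerA_eq shapes n _ (by simpa using hnN)]
    have hget : ((List.range N).map (fun j =>
        if j < n then shapes.foldl (fun m s => pvUpd j m s) 0 else 0)).getD n 0 = 0 := by
      simp [List.getD_eq_getElem?_getD, List.getElem?_map, List.getElem?_range hnN]
    rw [hget, set_map_range hnN]
    apply List.map_congr_left
    intro j hjmem
    rcases eq_or_ne j n with rfl | h
    · simp
    · have hiff : j < n + 1 ↔ j < n := by omega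
      simp [h, hiff]

theorem portA_eq (shapes : List (List Int)) (md : Int) :
    (PySem.List.pyRange 0 md 1).foldl
      (fun max_shape dim =>
        shapes.foldl
          (fun max_shape shape =>
            match PySem.List.pyGet? shape dim with
            | none => max_shape
            | some dim_len =>
              if dim_len > (PySem.List.pyGet? max_shape dim).getD 0 then
                max_shape.set dim.toNat dim_len
              else max_shape)
          max_shape)
      (List.replicate md.toNat 0)
    = pvTarget shapes md.toNat := by
  by_cases hmd : md ≤ 0
  · rw [PySem.List.pyRange_one_eq_nil hmd]
    simp [pvTarget, Int.toNat_of_nonpos hmd]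
  · rw [PySem.List.pyRange_zero md]
    rw [foldA_eq shapes md.toNat md.toNat le_rfl]
    apply List.map_congr_left
    intro j hjmem
    rw [List.mem_range] at hjmem
    simp [hjmem]

-- pointwise description of one merge step
theorem pvMerge_getElem? (a b : List Int) (j : Nat) :
    (pvMerge a b)[j]? = pvOmax a[j]? b[j]? := by
  unfold pvMerge
  simp only [List.append_assoc]
  have hc : ((a.zip b).map (fun p => max p.1 p.2)).length = min a.length b.length := by simp
  by_cases hj : j < min a.length b.length
  · have hja : j < a.length := by omega
    have hjb : j < b.length := by omega
    rw [List.getElem?_append_left (by omega), List.getElem?_eq_getElem (by simpa using hj),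
      List.getElem?_eq_getElem hja, List.getElem?_eq_getElem hjb]
    simp [pvOmax, List.getElem_zip]
  · rw [List.getElem?_append_right (by omega), hc]
    rcases Nat.lt_or_ge a.length b.length with hab | hab
    · have hka : min a.length b.length = a.length := by omega
      have hanil : a.drop (min a.length b.length) = [] := by
        rw [hka]; exact List.drop_length
      rw [hanil, List.nil_append, List.getElem?_drop,
        List.getElem?_eq_none (l := a) (by omega)]
      have : min a.length b.length + (j - min a.length b.length) = j := by omega
      rw [this]
      rfl
    · have hkb : min a.length b.length = b.length := by omega
      have hbnil : b.drop (min a.length b.length) = [] := by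
        rw [hkb]; exact List.drop_length
      rw [hbnil, List.append_nil, List.getElem?_drop,
        List.getElem?_eq_none (l := b) (by omega)]
      have : min a.length b.length + (j - min a.length b.length) = j := by omega
      rw [this]
      cases a[j]? <;> rfl

-- pointwise description of the whole merge fold
theorem mergeFold_getElem? (shapes : List (List Int)) (j : Nat) :
    ∀ acc : List Int,
    (shapes.foldl pvMerge acc)[j]? = shapes.foldl (fun o s => pvOmax o s[j]?) acc[j]? := by
  induction shapes with
  | nil => intro acc; rfl
  | cons s ss ih =>
    intro acc
    rw [List.foldl_cons, List.foldl_cons, ih, pvMerge_getElem?]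

-- clamping commutes with the fold: A's running max with 0-baseline vs B's optional max
theorem clamp_fold (j : Nat) (shapes : List (List Int)) :
    ∀ o : Option Int,
    pvClamp (shapes.foldl (fun o s => pvOmax o s[j]?) o)
      = shapes.foldl (fun m s => pvUpd j m s) (pvClamp o) := by
  induction shapes with
  | nil => intro o; rfl
  | cons s ss ih =>
    intro o
    rw [List.foldl_cons, List.foldl_cons, ih]
    congr 1
    cases o with
    | none =>
      cases hsj : s[j]? with
      | none => simp [pvOmax, pvClamp, pvUpd, hsj]
      | some w => simp [pvOmax, pvClamp, pvUpd, hsj]; omega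
    | some v =>
      cases hsj : s[j]? with
      | none => simp [pvOmax, pvClamp, pvUpd, hsj]
      | some w => simp [pvOmax, pvClamp, pvUpd, hsj]; omega

theorem portB_eq (shapes : List (List Int)) (md : Int) :
    (PySem.List.pyRange 0 md 1).map (fun i =>
      if i < ((shapes.foldl pvMerge []).length : Int) then
        max ((PySem.List.pyGet? (shapes.foldl pvMerge []) i).getD 0) 0 else 0)
    = pvTarget shapes md.toNat := by
  by_cases hmd : md ≤ 0
  · rw [PySem.List.pyRange_one_eq_nil hmd]
    simp [pvTarget, Int.toNat_of_nonpos hmd]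
  · rw [PySem.List.pyRange_zero md, List.map_map]
    unfold pvTarget
    apply List.map_congr_left
    intro j hjmem
    have key : (shapes.foldl pvMerge [])[j]? = shapes.foldl (fun o s => pvOmax o s[j]?) none := by
      simpa using mergeFold_getElem? shapes j []
    have hclamp := clamp_fold j shapes none
    rw [← key] at hclamp
    simp only [Function.comp_apply, PySem.List.pyGet?_natCast]
    by_cases hj : j < (shapes.foldl pvMerge []).length
    · have hcast : ((j : Int) < ((shapes.foldl pvMerge []).length : Int)) := by exact_mod_cast hj
      rw [if_pos hcast]
      rw [List.getElem?_eq_getElem hj] at hclamp ⊢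
      simpa [pvClamp] using hclamp
    · have hcast : ¬ ((j : Int) < ((shapes.foldl pvMerge []).length : Int)) := by exact_mod_cast hj
      rw [if_neg hcast]
      rw [List.getElem?_eq_none (by omega)] at hclamp
      simpa [pvClamp] using hclamp

-- ===== VERDICT (by name: the statement is the Claim_ definition above) =====
theorem compute_max_shape_spec : Claim_equal_compute_max_shape := by
  intro shapes max_dims _hdom _hpre
  show compute_max_shape shapes max_dims = compute_max_shape_alt shapes max_dims
  unfold compute_max_shape compute_max_shape_alt
  have hfun : (fun (merged shape : List Int) =>
      let common := (merged.zip shape).map (fun p => max p.1 p.2)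
      let k := common.length
      common ++ merged.drop k ++ shape.drop k) = pvMerge := rfl
  rw [hfun, portA_eq, portB_eq]
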